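-- pv_equiv track=rewrite | github.com/ryonakagawa-1012/AtCoder | ABC/297/B.py | k_between_r
-- ===== SOURCE A (Python) =====
-- def k_between_r(s):
--     r_flag = False
--     k_flag = False
--     for char in s:
--         if char == "R":
--             r_flag = True
--             if k_flag:
--                 return True
--         if char == "K" and r_flag:
--             k_flag = True
--
--     return False
-- ===== SOURCE B (Python) =====
-- def k_between_r(s):
--     _, sep, rest = s.partition("R")
--     if not sep:
--         return False
--     _, sep, rest = rest.partition("K")
--     if not sep:
--         return False
--     return "R" in rest
-- ===== Notes on version B (the rewrite author's own statement) =====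
-- stated objective: simpler
-- what changed: Replaced the per-character two-flag state machine with three staged positional searches (partition on the first 'R', then on the first 'K' after it, then a membership test for 'R' in the remainder).
import Mathlib
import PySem

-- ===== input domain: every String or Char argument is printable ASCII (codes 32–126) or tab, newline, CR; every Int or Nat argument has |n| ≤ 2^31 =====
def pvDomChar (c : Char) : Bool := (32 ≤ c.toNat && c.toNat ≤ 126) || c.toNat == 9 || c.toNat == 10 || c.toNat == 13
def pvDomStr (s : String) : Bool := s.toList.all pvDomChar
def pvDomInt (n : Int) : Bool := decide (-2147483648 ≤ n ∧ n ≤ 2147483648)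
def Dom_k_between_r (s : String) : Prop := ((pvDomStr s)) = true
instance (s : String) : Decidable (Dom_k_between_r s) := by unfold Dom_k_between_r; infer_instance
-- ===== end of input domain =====

-- B replaces A's per-character two-flag state machine with three staged searches
-- (partition on 'R', then on 'K', then 'R' membership); objective: simpler.

-- ===== PORT A =====
-- the for-loop over s with state (r_flag, k_flag); early 'return True' becomes the
-- 'true' branch of the recursion
def kbrLoop : List Char → Bool → Bool → Bool
  | [], _, _ => false
  | c :: rest, r, k =>
      let r' := if c = 'R' then true else r
      if c = 'R' ∧ k = true then true
      else
        let k' := if c = 'K' ∧ r' = true then true else k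
        kbrLoop rest r' k'

def k_between_r (s : String) : Bool := kbrLoop s.toList false false

-- ===== PORT B =====
-- s.partition("R") for the single-character separator: none if absent, else the
-- remainder after the first occurrence (exact for a one-char separator)
def afterFirst (c : Char) : List Char → Option (List Char)
  | [] => none
  | x :: rest => if x = c then some rest else afterFirst c rest

def k_between_r_alt (s : String) : Bool :=
  match afterFirst 'R' s.toList with
  | none => false
  | some rest =>
    match afterFirst 'K' rest with
    | none => false
    | some rest2 => rest2.contains 'R'

-- ===== PRECONDITION & SPEC =====
def Spec_k_between_r (s : String) (out : Bool) : Prop := out = k_between_r_alt s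
instance (s : String) (out : Bool) : Decidable (Spec_k_between_r s out) := by unfold Spec_k_between_r; infer_instance

-- ===== CLAIM (what is proved, stated in full; the proofs are below) =====
def Claim_equal_k_between_r : Prop := ∀ (s : String), Dom_k_between_r s → Spec_k_between_r s (k_between_r s)

-- ===== LEMMAS AND PROOFS =====

-- with k_flag already set, the loop returns iff some later char is 'R'
theorem kbrLoop_true_true : ∀ (l : List Char) (r : Bool), kbrLoop l r true = l.contains 'R'
  | [], _ => rfl
  | c :: rest, r => by
    simp only [kbrLoop, List.contains_cons]
    by_cases h : c = 'R'
    · simp [h]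
    · simp [h, Ne.symm h, kbrLoop_true_true rest]

-- with r_flag set and k_flag clear, the loop searches for 'K' then for 'R'
theorem kbrLoop_true_false : ∀ (l : List Char),
    kbrLoop l true false =
      (match afterFirst 'K' l with
       | none => false
       | some rest => rest.contains 'R')
  | [] => rfl
  | c :: rest => by
    simp only [kbrLoop, afterFirst]
    by_cases hK : c = 'K'
    · have hR : ¬ c = 'R' := by simp [hK]
      simp [hK, kbrLoop_true_true rest]
    · by_cases hR : c = 'R' <;> simp [hK, hR, kbrLoop_true_false rest]

-- with both flags clear, the loop first searches for 'R'
theorem kbrLoop_false_false : ∀ (l : List Char),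
    kbrLoop l false false =
      (match afterFirst 'R' l with
       | none => false
       | some rest => kbrLoop rest true false)
  | [] => rfl
  | c :: rest => by
    simp only [kbrLoop, afterFirst]
    by_cases hR : c = 'R'
    · simp [hR]
    · by_cases hK : c = 'K' <;> simp [hR, hK, kbrLoop_false_false rest]

-- ===== VERDICT (by name: the statement is the Claim_ definition above) =====
theorem k_between_r_spec : Claim_equal_k_between_r := by
  intro s _
  unfold Spec_k_between_r k_between_r k_between_r_alt
  rw [kbrLoop_false_false]
  cases afterFirst 'R' s.toList with
  | none => rfl
  | some rest => exact kbrLoop_true_false rest
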